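-- pv_equiv track=rewrite | github.com/ML-KULeuven/deepstochlog | examples/bracket/bracket_data.py | create_all_possible_bracket_sequences
-- ===== SOURCE A (Python) =====
-- import typing
--
-- def create_all_possible_bracket_sequences(max_length: int) -> typing.List[str]:
--     elements = [""]
--     last_new_elements = elements
--     while len(elements[len(elements) - 1]) <= max_length - 1:
--         last_new_elements = [
--             new_els
--             for element in last_new_elements
--             for new_els in (element + ")", element + "(")
--         ]
--         elements.extend(last_new_elements)
--     return elements
-- ===== SOURCE B (Python) =====
-- import itertools
-- import typing
--
--
-- def create_all_possible_bracket_sequences(max_length: int) -> typing.List[str]: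
--     result = []
--     for length in range(max(max_length, 0) + 1):
--         for tup in itertools.product(")(", repeat=length):
--             result.append("".join(tup))
--     return result
-- ===== Notes on version B (the rewrite author's own statement) =====
-- stated objective: idiomatic
-- what changed: Replaces A's while-loop that repeatedly doubles the last block of sequences by appending ')' and '(' (extending a shared accumulator) with a per-length enumeration using itertools.product over ')(' joined per tuple.
import Mathlib
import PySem

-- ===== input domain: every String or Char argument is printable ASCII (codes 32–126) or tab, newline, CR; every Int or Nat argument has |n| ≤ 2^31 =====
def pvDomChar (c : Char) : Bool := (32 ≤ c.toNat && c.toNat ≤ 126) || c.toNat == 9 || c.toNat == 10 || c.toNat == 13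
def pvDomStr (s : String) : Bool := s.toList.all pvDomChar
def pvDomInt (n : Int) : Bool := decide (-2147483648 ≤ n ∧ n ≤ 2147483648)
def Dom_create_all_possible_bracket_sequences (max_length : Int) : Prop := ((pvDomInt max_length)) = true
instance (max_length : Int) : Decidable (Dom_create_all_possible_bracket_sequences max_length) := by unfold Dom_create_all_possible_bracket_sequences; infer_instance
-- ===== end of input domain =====

-- B replaces A's while-loop that grows the last block by appending ')' / '(' with a per-length
-- enumeration via itertools.product; same return value, different control flow (objective: idiomatic).

-- ===== PORT A =====
-- A's while loop, made total with a fuel counter (max_length.toNat + 1 passes always suffice,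
-- since the last element's length grows by one each pass); the fuel guard never fires before the
-- loop condition turns false.  elements is always nonempty, so pyGet? never returns none and the
-- `.getD ""` default is never used.
def pvALoop (max_length : Int) : Nat → List String → List String → List String
  | 0, elements, _ => elements
  | fuel + 1, elements, last_new_elements =>
    if PySem.Str.len ((PySem.List.pyGet? elements ((elements.length : Int) - 1)).getD "")
        ≤ max_length - 1 then
      let new_last := last_new_elements.flatMap (fun element => [element ++ ")", element ++ "("])
      pvALoop max_length fuel (elements ++ new_last) new_last
    else
      elements

def create_all_possible_bracket_sequences (max_length : Int) : List String :=
  pvALoop max_length (max_length.toNat + 1) [""] [""]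

-- ===== PORT B =====
-- itertools.product(")(", repeat=n): tuples as char lists, leftmost position varying slowest.
def pvProdTuples : Nat → List (List Char)
  | 0 => [[]]
  | n + 1 => (")(".toList).flatMap (fun c => (pvProdTuples n).map (fun t => c :: t))

def create_all_possible_bracket_sequences_alt (max_length : Int) : List String :=
  (PySem.List.pyRange 0 (max max_length 0 + 1) 1).flatMap
    (fun length => (pvProdTuples length.toNat).map (fun tup => String.ofList tup))

-- ===== PRECONDITION & SPEC =====
def Spec_create_all_possible_bracket_sequences (max_length : Int) (out : List String) : Prop := out = create_all_possible_bracket_sequences_alt max_length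
instance (max_length : Int) (out : List String) : Decidable (Spec_create_all_possible_bracket_sequences max_length out) := by unfold Spec_create_all_possible_bracket_sequences; infer_instance

-- ===== CLAIM (what is proved, stated in full; the proofs are below) =====
def Claim_equal_create_all_possible_bracket_sequences : Prop := ∀ (max_length : Int), Dom_create_all_possible_bracket_sequences max_length → Spec_create_all_possible_bracket_sequences max_length (create_all_possible_bracket_sequences max_length)

-- ===== LEMMAS AND PROOFS =====

-- the block of strings of length n, in A's generation order
def pvBlock : Nat → List String
  | 0 => [""]
  | n + 1 => (pvBlock n).flatMap (fun e => [e ++ ")", e ++ "("])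

-- the concatenation of the blocks of lengths 0..k
def pvC (k : Nat) : List String := (List.range (k + 1)).flatMap pvBlock

lemma pvProdTuples_snoc (n : Nat) :
    pvProdTuples (n + 1) = (pvProdTuples n).flatMap (fun t => [t ++ [')'], t ++ ['(']]) := by
  induction n with
  | zero => decide
  | succ n ih =>
    conv_lhs => rw [pvProdTuples, ih]
    conv_rhs => rw [pvProdTuples]
    simp [List.flatMap_map, List.map_flatMap, List.cons_append]

lemma pvBlock_eq (n : Nat) : pvBlock n = (pvProdTuples n).map String.ofList := by
  induction n with
  | zero => decide
  | succ n ih =>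
    show (pvBlock n).flatMap (fun e => [e ++ ")", e ++ "("]) = _
    rw [ih, pvProdTuples_snoc, List.flatMap_map, List.map_flatMap]
    apply List.flatMap_congr
    intro t _
    simp only [List.map_cons, List.map_nil]
    have h1 : String.ofList t ++ ")" = String.ofList (t ++ [')']) := by
      rw [← String.toList_inj]; simp
    have h2 : String.ofList t ++ "(" = String.ofList (t ++ ['(']) := by
      rw [← String.toList_inj]; simp
    rw [h1, h2]

lemma pvProdTuples_len {n : Nat} {t : List Char} (h : t ∈ pvProdTuples n) : t.length = n := by
  induction n generalizing t with
  | zero => simp [pvProdTuples] at h; simp [h]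
  | succ n ih =>
    simp only [pvProdTuples, List.mem_flatMap, List.mem_map] at h
    obtain ⟨c, _, t', ht', rfl⟩ := h
    simp [ih ht']

lemma pvBlock_len {n : Nat} {s : String} (h : s ∈ pvBlock n) : s.toList.length = n := by
  rw [pvBlock_eq] at h
  obtain ⟨t, ht, rfl⟩ := List.mem_map.mp h
  simpa using pvProdTuples_len ht

lemma pvBlock_ne_nil (n : Nat) : pvBlock n ≠ [] := by
  induction n with
  | zero => decide
  | succ n ih =>
    show (pvBlock n).flatMap (fun e => [e ++ ")", e ++ "("]) ≠ []
    simp only [ne_eq, List.flatMap_eq_nil_iff]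
    intro h
    rcases List.exists_mem_of_ne_nil _ ih with ⟨x, hx⟩
    exact absurd (h x hx) (by simp)

lemma pvC_ne_nil (k : Nat) : pvC k ≠ [] := by
  unfold pvC
  rw [List.range_succ, List.flatMap_append]
  simp only [ne_eq, List.append_eq_nil_iff, not_and]
  intro _
  simpa using pvBlock_ne_nil k

lemma pvC_succ (k : Nat) : pvC (k + 1) = pvC k ++ pvBlock (k + 1) := by
  unfold pvC
  rw [List.range_succ (n := k + 1), List.flatMap_append]
  simp

lemma pvGet_last (xs : List String) (h : xs ≠ []) :
    (PySem.List.pyGet? xs ((xs.length : Int) - 1)).getD "" = xs.getLast h := by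
  have hl : 1 ≤ xs.length := List.length_pos_of_ne_nil h
  simp only [PySem.List.pyGet?, PySem.List.pyIdx?]
  have h0 : (0 : Int) ≤ (xs.length : Int) - 1 := by omega
  rw [if_pos h0]
  rw [if_pos (by omega : (xs.length : Int) - 1 < (xs.length : Int))]
  have ht : ((xs.length : Int) - 1).toNat = xs.length - 1 := by omega
  rw [ht]
  have hlt : xs.length - 1 < xs.length := by omega
  simp [List.getLast_eq_getElem, List.getElem?_eq_getElem hlt]

lemma pvC_last_len (k : Nat) :
    PySem.Str.len ((PySem.List.pyGet? (pvC k) (((pvC k).length : Int) - 1)).getD "") = (k : Int) := by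
  rw [pvGet_last (pvC k) (pvC_ne_nil k)]
  have h1 : (pvC k).getLast? = (pvBlock k).getLast? := by
    unfold pvC
    rw [List.range_succ, List.flatMap_append, List.getLast?_append]
    rcases List.exists_mem_of_ne_nil _ (pvBlock_ne_nil k) with ⟨x, hx⟩
    have : (pvBlock k).getLast? = some ((pvBlock k).getLast (pvBlock_ne_nil k)) :=
      List.getLast?_eq_some_getLast _
    simp [this]
  have hmem : (pvC k).getLast (pvC_ne_nil k) ∈ pvBlock k := by
    apply List.mem_of_getLast?
    rw [← h1]
    exact List.getLast?_eq_some_getLast (pvC_ne_nil k)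
  have := pvBlock_len hmem
  simp [PySem.Str.len, this]

lemma pvLoopInv (ml : Int) (hml : 0 ≤ ml) :
    ∀ (fuel k : Nat), k ≤ ml.toNat → ml.toNat - k ≤ fuel →
      pvALoop ml fuel (pvC k) (pvBlock k) = pvC ml.toNat := by
  intro fuel
  induction fuel with
  | zero =>
    intro k hk hf
    have : k = ml.toNat := by omega
    simp [pvALoop, this]
  | succ fuel ih =>
    intro k hk hf
    rw [pvALoop]
    by_cases hcond : PySem.Str.len ((PySem.List.pyGet? (pvC k) (((pvC k).length : Int) - 1)).getD "")
        ≤ ml - 1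
    · rw [if_pos hcond]
      have hklt : k < ml.toNat := by
        have := pvC_last_len k
        rw [this] at hcond
        omega
      have hstep : (pvBlock k).flatMap (fun e => [e ++ ")", e ++ "("]) = pvBlock (k + 1) := rfl
      show pvALoop ml fuel (pvC k ++ (pvBlock k).flatMap (fun e => [e ++ ")", e ++ "("]))
          ((pvBlock k).flatMap (fun e => [e ++ ")", e ++ "("])) = pvC ml.toNat
      rw [hstep, ← pvC_succ]
      exact ih (k + 1) (by omega) (by omega)
    · rw [if_neg hcond]
      have := pvC_last_len k
      rw [this] at hcond
      have : k = ml.toNat := by omega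
      rw [this]

lemma pvAlt_eq_C (ml : Int) (hml : 0 ≤ ml) :
    create_all_possible_bracket_sequences_alt ml = pvC ml.toNat := by
  unfold create_all_possible_bracket_sequences_alt pvC
  have hmax : max ml 0 = ml := by omega
  rw [hmax, PySem.List.pyRange_one, List.flatMap_map]
  have hb : (ml + 1 - 0).toNat = ml.toNat + 1 := by omega
  rw [hb]
  apply List.flatMap_congr
  intro j _
  have : ((0 : Int) + (j : Int)).toNat = j := by omega
  rw [this, ← pvBlock_eq]

-- ===== VERDICT (by name: the statement is the Claim_ definition above) =====
theorem create_all_possible_bracket_sequences_spec : Claim_equal_create_all_possible_bracket_sequences := by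
  intro ml _
  show create_all_possible_bracket_sequences ml = create_all_possible_bracket_sequences_alt ml
  by_cases hml : 0 ≤ ml
  · rw [pvAlt_eq_C ml hml]
    have h0 : pvC 0 = [""] := by decide
    have hb0 : pvBlock 0 = [""] := rfl
    unfold create_all_possible_bracket_sequences
    have hinv := pvLoopInv ml hml (ml.toNat + 1) 0 (by omega) (by omega)
    rw [h0, hb0] at hinv
    exact hinv
  · -- negative max_length: the loop condition is false at once, B's range is just [0]
    have hneg : ml < 0 := by omega
    unfold create_all_possible_bracket_sequences
    have ht : ml.toNat = 0 := by omega
    rw [ht, pvALoop]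
    have hc : ¬ PySem.Str.len ((PySem.List.pyGet? ([""] : List String) ((([""] : List String).length : Int) - 1)).getD "") ≤ ml - 1 := by
      simp only [PySem.Str.len]
      norm_num
      omega
    rw [if_neg hc]
    unfold create_all_possible_bracket_sequences_alt
    have hmax : max ml 0 = 0 := by omega
    rw [hmax]
    decide
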